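-- pv_equiv track=rewrite | github.com/WoutDeleu/ExcelFormulaExtractor | ExcelHandler/handle_sum.py | get_sums
-- ===== SOURCE A (Python) =====
-- def get_sums(excel_formula):
--     sums = []
--     counter_closing_brackets_needed = 1
--     current_sum = ''
--     for ch in excel_formula:
--         if ch == '(':
--             counter_closing_brackets_needed += 1
--         elif ch == ')':
--             counter_closing_brackets_needed -= 1
--             if counter_closing_brackets_needed == 0:
--                 sums.append(current_sum)
--                 current_sum = ''
--         else:
--             current_sum += ch
--     return sums
-- ===== SOURCE B (Python) =====
-- def get_sums(excel_formula):
--     # Different decomposition: instead of accumulating a current_sum char by char,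
--     # repeatedly find the next emit boundary (the ')' that brings the running
--     # balance to exactly 0), slice the segment out and strip its parentheses.
--     res = []
--     s = excel_formula
--     bal = 1
--     while True:
--         j = None
--         b = bal
--         for i, ch in enumerate(s):
--             if ch == '(':
--                 b += 1
--             elif ch == ')':
--                 b -= 1
--                 if b == 0:
--                     j = i
--                     break
--         if j is None:
--             return res
--         res.append(''.join(ch for ch in s[:j] if ch not in '()'))
--         s = s[j + 1:]
--         bal = 0
-- ===== Notes on version B (the rewrite author's own statement) =====
-- stated objective: alternative
-- what changed: B replaces A's single accumulating pass (growing current_sum char by char) with a find-next-boundary loop: locate the closing bracket that brings the running balance to 0, slice that segment out of the string and strip its brackets, then continue after it with balance 0.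
import Mathlib
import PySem

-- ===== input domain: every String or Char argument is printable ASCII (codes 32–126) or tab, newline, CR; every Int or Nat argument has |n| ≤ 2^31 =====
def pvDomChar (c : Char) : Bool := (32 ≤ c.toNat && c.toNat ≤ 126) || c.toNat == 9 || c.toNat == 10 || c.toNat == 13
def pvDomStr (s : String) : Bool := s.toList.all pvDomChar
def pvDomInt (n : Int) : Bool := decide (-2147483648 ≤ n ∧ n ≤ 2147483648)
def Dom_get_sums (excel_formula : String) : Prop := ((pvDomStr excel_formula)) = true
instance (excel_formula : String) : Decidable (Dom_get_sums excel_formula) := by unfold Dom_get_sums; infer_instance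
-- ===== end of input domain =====

-- B replaces the accumulating single pass by a find-boundary-then-slice loop (alternative decomposition, same cost).



-- ===== PORT A =====
-- A: one pass, counter starts at 1; '(' increments, ')' decrements and emits
-- current_sum when the counter reaches 0; other chars extend current_sum.
def goA : List Char → Int → List Char → List String → List String
  | [], _, _, sums => sums
  | ch :: t, c, cur, sums =>
    if ch = '(' then goA t (c + 1) cur sums
    else if ch = ')' then
      if c - 1 = 0 then goA t (c - 1) [] (sums ++ [String.mk cur])
      else goA t (c - 1) cur sums
    else goA t c (cur ++ [ch]) sums

def get_sums (excel_formula : String) : List String :=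
  goA excel_formula.toList 1 [] []

-- ===== PORT B =====
-- B: repeatedly find the next emit boundary (the ')' that drops the balance to 0),
-- slice the segment out and strip its parentheses, continue after it with balance 0.
def pvKeep (ch : Char) : Bool := ch ≠ '(' && ch ≠ ')'

-- inner `for` loop of Source B: index of the first ')' bringing the balance to 0
def findB : List Char → Int → Option Nat
  | [], _ => none
  | ch :: t, b =>
    if ch = '(' then (findB t (b + 1)).map (· + 1)
    else if ch = ')' then
      if b - 1 = 0 then some 0 else (findB t (b - 1)).map (· + 1)
    else (findB t b).map (· + 1)

theorem findB_lt (cs : List Char) (b : Int) (j : Nat) (h : findB cs b = some j) :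
    j < cs.length := by
  induction cs generalizing b j with
  | nil => simp [findB] at h
  | cons ch t ih =>
    simp only [findB] at h
    split_ifs at h with h1 h2 h3
    · rcases Option.map_eq_some_iff.mp h with ⟨k, hk, rfl⟩
      simpa using Nat.succ_lt_succ (ih _ _ hk)
    · cases h; simp
    · rcases Option.map_eq_some_iff.mp h with ⟨k, hk, rfl⟩
      simpa using Nat.succ_lt_succ (ih _ _ hk)
    · rcases Option.map_eq_some_iff.mp h with ⟨k, hk, rfl⟩
      simpa using Nat.succ_lt_succ (ih _ _ hk)

-- outer `while` loop of Source B
def altGo (cs : List Char) (bal : Int) : List String :=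
  match h : findB cs bal with
  | none => []
  | some j => String.mk ((cs.take j).filter pvKeep) :: altGo (cs.drop (j + 1)) 0
termination_by cs.length
decreasing_by
  have := findB_lt cs bal j h
  simp only [List.length_drop]
  omega

def get_sums_alt (excel_formula : String) : List String :=
  altGo excel_formula.toList 1

-- ===== PRECONDITION & SPEC =====
def Spec_get_sums (excel_formula : String) (out : List String) : Prop := out = get_sums_alt excel_formula
instance (excel_formula : String) (out : List String) : Decidable (Spec_get_sums excel_formula out) := by unfold Spec_get_sums; infer_instance

-- ===== CLAIM (what is proved, stated in full; the proofs are below) =====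
def Claim_equal_get_sums : Prop := ∀ (excel_formula : String), Dom_get_sums excel_formula → Spec_get_sums excel_formula (get_sums excel_formula)

-- ===== LEMMAS AND PROOFS =====

theorem altGo_eq (cs : List Char) (bal : Int) :
    altGo cs bal = match findB cs bal with
      | none => []
      | some j => String.mk ((cs.take j).filter pvKeep) :: altGo (cs.drop (j + 1)) 0 := by
  rw [altGo]
  split <;> rename_i h <;> simp [h]

theorem goA_eq_find (cs : List Char) (c : Int) (cur : List Char) (sums : List String) :
    goA cs c cur sums = sums ++ (match findB cs c with
      | none => []
      | some j => String.mk (cur ++ (cs.take j).filter pvKeep) :: altGo (cs.drop (j + 1)) 0) := by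
  induction cs generalizing c cur sums with
  | nil => simp [goA, findB]
  | cons ch t ih =>
    simp only [goA, findB, ih]
    split_ifs with h1 h2 h3
    · cases hf : findB t (c + 1) with
      | none => simp [hf]
      | some j => subst h1; simp [hf, pvKeep, List.drop_succ_cons]
    · rw [h3]
      cases hf : findB t 0 with
      | none =>
        simp only [hf, List.drop_succ_cons, List.drop_zero, List.take_zero, List.filter_nil,
          List.append_nil, List.nil_append]
        conv_rhs => rw [altGo_eq]
        simp [hf]
      | some j =>
        simp only [hf, List.drop_succ_cons, List.drop_zero, List.take_zero, List.filter_nil,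
          List.append_nil, List.nil_append]
        conv_rhs => rw [altGo_eq]
        simp [hf]
    · cases hf : findB t (c - 1) with
      | none => simp [hf]
      | some j => subst h2; simp [hf, pvKeep, List.drop_succ_cons]
    · cases hf : findB t c with
      | none => simp [hf]
      | some j => simp [hf, pvKeep, h1, h2, List.drop_succ_cons, List.append_assoc]

-- ===== VERDICT (by name: the statement is the Claim_ definition above) =====
theorem get_sums_spec : Claim_equal_get_sums := by
  intro f _
  unfold Spec_get_sums get_sums get_sums_alt
  rw [goA_eq_find, altGo_eq]
  cases hf : findB f.toList 1 <;> simp
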